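-- pv_equiv track=rewrite | github.com/TomJSoftwire/advent-of-code-2021 | 17/sol2.py | getStepsForV
-- ===== SOURCE A (Python) =====
-- xTarget = [281,311]
--
-- yTarget = [-74, -54]
--
-- def getNextPos(pos, vx, vy):
--     posN = list(pos)
--     posN[0] += vx
--     posN[1] += vy
--
--     vyN = vy - 1
--     vxN = vx - (1 if vx > 0 else 0)
--
--     return (posN, vxN, vyN)
--
-- def getStepsForV(v):
--     vx = v[0]
--     vy = v[1]
--     pos = [0,0]
--     steps = []
--     while pos[0] <= xTarget[1] and pos[1] >= yTarget[0]:
--         steps.append(pos)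
--         pos, vx, vy = getNextPos(pos, vx, vy)
--     return steps
-- ===== SOURCE B (Python) =====
-- xTarget = [281, 311]
--
-- yTarget = [-74, -54]
--
--
-- def getStepsForV(v):
--     # Closed-form position at step k instead of incremental velocity updates.
--     vx = v[0]
--     vy = v[1]
--     steps = []
--     k = 0
--     while True:
--         if vx > 0:
--             x = k * vx - k * (k - 1) // 2 if k <= vx else vx * (vx + 1) // 2
--         else:
--             x = k * vx
--         y = k * vy - k * (k - 1) // 2
--         if x > xTarget[1] or y < yTarget[0]:
--             return steps
--         steps.append([x, y])
--         k += 1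
-- ===== Notes on version B (the rewrite author's own statement) =====
-- stated objective: alternative
-- what changed: B computes each position directly from the step index k by closed-form sums (triangular numbers, with vx>0 capped at vx*(vx+1)//2 and vx<=0 constant velocity) instead of threading the (pos, vx, vy) state through an incremental update helper.
import Mathlib
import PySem

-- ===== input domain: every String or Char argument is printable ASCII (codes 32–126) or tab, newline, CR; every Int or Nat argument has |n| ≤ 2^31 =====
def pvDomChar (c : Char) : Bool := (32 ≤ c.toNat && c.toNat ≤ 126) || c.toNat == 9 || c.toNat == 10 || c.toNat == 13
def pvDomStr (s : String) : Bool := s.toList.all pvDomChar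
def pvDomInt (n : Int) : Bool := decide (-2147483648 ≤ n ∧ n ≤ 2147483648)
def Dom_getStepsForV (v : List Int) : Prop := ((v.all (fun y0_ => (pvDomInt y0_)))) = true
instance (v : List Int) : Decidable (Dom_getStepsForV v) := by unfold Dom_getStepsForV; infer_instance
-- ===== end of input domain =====

-- B computes each position by a closed form in the step index k instead of threading
-- incremental (pos, vx, vy) state; equivalence is about the return value.
-- Module constants xTarget = [281,311], yTarget = [-74,-54] appear as the literals 311 and -74.
-- Both while-loops are made total by a fuel guard of (2*max vy 0 + 160).toNat iterations,
-- which is sufficient: once k ≥ 2*max vy 0 + 151 the y-coordinate is below -74 and the loop has stopped.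

-- ===== PORT A =====
def getNextPos (x y vx vy : Int) : (Int × Int) × Int × Int :=
  ((x + vx, y + vy), vx - (if 0 < vx then 1 else 0), vy - 1)

def loopA (fuel : Nat) (x y vx vy : Int) (steps : List (List Int)) : List (List Int) :=
  match fuel with
  | 0 => steps
  | f + 1 =>
    if x ≤ 311 ∧ -74 ≤ y then
      let n := getNextPos x y vx vy
      loopA f n.1.1 n.1.2 n.2.1 n.2.2 (steps ++ [[x, y]])
    else steps

def getStepsForV (v : List Int) : List (List Int) :=
  match PySem.List.pyGet? v 0, PySem.List.pyGet? v 1 with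
  | some vx, some vy => loopA (2 * (max vy 0) + 160).toNat 0 0 vx vy []
  | _, _ => []

-- ===== PORT B =====
def xOf (vx k : Int) : Int :=
  if 0 < vx then
    (if k ≤ vx then k * vx - PySem.Int.floordiv (k * (k - 1)) 2
     else PySem.Int.floordiv (vx * (vx + 1)) 2)
  else k * vx

def yOf (vy k : Int) : Int := k * vy - PySem.Int.floordiv (k * (k - 1)) 2

def loopB (fuel : Nat) (vx vy k : Int) (steps : List (List Int)) : List (List Int) :=
  match fuel with
  | 0 => steps
  | f + 1 =>
    if 311 < xOf vx k ∨ yOf vy k < -74 then steps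
    else loopB f vx vy (k + 1) (steps ++ [[xOf vx k, yOf vy k]])

def getStepsForV_alt (v : List Int) : List (List Int) :=
  match PySem.List.pyGet? v 0 with
  | none => []
  | some vx =>
    match PySem.List.pyGet? v 1 with
    | none => []
    | some vy => loopB (2 * (max vy 0) + 160).toNat vx vy 0 []

-- ===== PRECONDITION & SPEC =====
-- A raises IndexError (v[0] or v[1]) when v has fewer than two elements; Pre_ excludes exactly those.
def Pre_getStepsForV (v : List Int) : Prop := 2 ≤ v.length
instance (v : List Int) : Decidable (Pre_getStepsForV v) := by unfold Pre_getStepsForV; infer_instance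
def pvWitness_getStepsForV : List Int := [6, 3]

def Spec_getStepsForV (v : List Int) (out : List (List Int)) : Prop := out = getStepsForV_alt v
instance (v : List Int) (out : List (List Int)) : Decidable (Spec_getStepsForV v out) := by unfold Spec_getStepsForV; infer_instance

-- ===== CLAIM (what is proved, stated in full; the proofs are below) =====
def Claim_equal_getStepsForV : Prop := ∀ (v : List Int), Dom_getStepsForV v → Pre_getStepsForV v → Spec_getStepsForV v (getStepsForV v)

-- ===== LEMMAS AND PROOFS =====

-- ghost: A's residual x-velocity after k steps
def VXf (vx k : Int) : Int := if 0 < vx then max (vx - k) 0 else vx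

-- exactness of the triangular-number floor division (k*(k-1) is even)
lemma fd_half (n m : Int) (h : n = m + m) : PySem.Int.floordiv n 2 = m := by
  have he : PySem.Int.floordiv n 2 = n / 2 := PySem.Int.floordiv_eq_ediv_of_pos (by omega)
  omega

lemma fd_tri (k : Int) : 2 * PySem.Int.floordiv (k * (k - 1)) 2 = k * (k - 1) := by
  obtain ⟨m, hm⟩ := Int.even_mul_succ_self (k - 1)
  have hc : k * (k - 1) = (k - 1) * (k - 1 + 1) := by ring
  have := fd_half (k * (k - 1)) m (by omega)
  omega

lemma yOf_step (vy k : Int) : yOf vy (k + 1) = yOf vy k + (vy - k) := by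
  have h1 := fd_tri (k + 1)
  have h2 := fd_tri k
  have h3 : (k + 1) * (k + 1 - 1) = k * (k - 1) + 2 * k := by ring
  simp only [yOf]; linarith

lemma xOf_step (vx k : Int) : xOf vx (k + 1) = xOf vx k + VXf vx k := by
  simp only [xOf, VXf]
  by_cases hv : 0 < vx
  · simp only [if_pos hv]
    by_cases hk1 : k + 1 ≤ vx
    · have hk : k ≤ vx := by omega
      rw [if_pos hk1, if_pos hk]
      have h1 := fd_tri (k + 1)
      have h2 := fd_tri k
      have h3 : (k + 1) * (k + 1 - 1) = k * (k - 1) + 2 * k := by ring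
      have hm : max (vx - k) 0 = vx - k := by omega
      rw [hm]; linarith
    · by_cases hk : k ≤ vx
      · have hkv : k = vx := by omega
        subst hkv
        rw [if_neg hk1, if_pos hk]
        obtain ⟨m, hm⟩ := Int.even_mul_succ_self k
        have hfd : PySem.Int.floordiv (k * (k + 1)) 2 = m := fd_half _ _ (by omega)
        have h2 := fd_tri k
        have hmx : max (k - k) 0 = 0 := by omega
        rw [hfd, hmx]
        have hr1 : k * (k + 1) = k * k + k := by ring
        have hr2 : k * (k - 1) = k * k - k := by ring
        linarith
      · rw [if_neg hk1, if_neg hk]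
        have hmx : max (vx - k) 0 = 0 := by omega
        rw [hmx]; ring
  · simp only [if_neg hv]; ring

lemma vxf_step (vx k : Int) :
    VXf vx (k + 1) = VXf vx k - (if 0 < VXf vx k then 1 else 0) := by
  simp only [VXf]
  split_ifs at * <;> omega

lemma xOf_zero (vx : Int) : xOf vx 0 = 0 := by
  have h : PySem.Int.floordiv (0 * (0 - 1 : Int)) 2 = 0 := by decide
  simp only [xOf]
  split_ifs with h1 h2
  · rw [h]; ring
  · omega
  · ring

lemma yOf_zero (vy : Int) : yOf vy 0 = 0 := by
  have h : PySem.Int.floordiv (0 * (0 - 1 : Int)) 2 = 0 := by decide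
  simp only [yOf, h]; ring

lemma vxf_zero (vx : Int) : VXf vx 0 = vx := by
  simp only [VXf]; split_ifs <;> omega

lemma loop_eq (vx vy : Int) (fuel : Nat) :
    ∀ (k : Int) (acc : List (List Int)),
      loopA fuel (xOf vx k) (yOf vy k) (VXf vx k) (vy - k) acc = loopB fuel vx vy k acc := by
  induction fuel with
  | zero => intro k acc; rfl
  | succ f ih =>
    intro k acc
    by_cases hc : 311 < xOf vx k ∨ yOf vy k < -74
    · rw [loopB, if_pos hc, loopA, if_neg (by omega)]
    · have hx : xOf vx k ≤ 311 := by omega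
      have hy : -74 ≤ yOf vy k := by omega
      rw [loopA, if_pos ⟨hx, hy⟩, loopB, if_neg hc]
      simp only [getNextPos]
      have e1 : yOf vy k + (vy - k) = yOf vy (k + 1) := (yOf_step vy k).symm
      have e2 : xOf vx k + VXf vx k = xOf vx (k + 1) := (xOf_step vx k).symm
      have e3 : VXf vx k - (if 0 < VXf vx k then 1 else 0) = VXf vx (k + 1) :=
        (vxf_step vx k).symm
      have e4 : vy - k - 1 = vy - (k + 1) := by ring
      rw [e2, e1, e3, e4]
      exact ih (k + 1) (acc ++ [[xOf vx k, yOf vy k]])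

-- ===== VERDICT (by name: the statement is the Claim_ definition above) =====
theorem getStepsForV_spec : Claim_equal_getStepsForV := by
  intro v _ hpre
  unfold Spec_getStepsForV
  match v, hpre with
  | vx :: vy :: t, _ =>
    simp only [getStepsForV, getStepsForV_alt, PySem.List.pyGet?, PySem.List.pyIdx?]
    have := loop_eq vx vy (2 * (max vy 0) + 160).toNat 0 []
    rw [xOf_zero, yOf_zero, vxf_zero] at this
    simpa using this
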